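-- pv_equiv track=rewrite | github.com/BronwynBowlesKing/hyperion-stellenbosch-university-python-data-science-bootcamp | Level 1 - Python for Data Science/M03T04 – Data Structures – 2D Lists/minesweeper.py | mine_position
-- ===== SOURCE A (Python) =====
-- def mine_position(minegrid, row, col):
--     for index, line in enumerate(minegrid):
--         if index == row:
--             if 0 <= col < len(line):
--                 return True
--             else:
--                 return False
--     return False
-- ===== SOURCE B (Python) =====
-- def mine_position(minegrid, row, col):
--     return 0 <= row < len(minegrid) and 0 <= col < len(minegrid[row])
-- ===== Notes on version B (the rewrite author's own statement) =====
-- stated objective: simpler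
-- what changed: Replaces the enumerate scan that walks the grid looking for the matching row index with a single short-circuit boolean bounds expression that indexes the row directly.
import Mathlib
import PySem

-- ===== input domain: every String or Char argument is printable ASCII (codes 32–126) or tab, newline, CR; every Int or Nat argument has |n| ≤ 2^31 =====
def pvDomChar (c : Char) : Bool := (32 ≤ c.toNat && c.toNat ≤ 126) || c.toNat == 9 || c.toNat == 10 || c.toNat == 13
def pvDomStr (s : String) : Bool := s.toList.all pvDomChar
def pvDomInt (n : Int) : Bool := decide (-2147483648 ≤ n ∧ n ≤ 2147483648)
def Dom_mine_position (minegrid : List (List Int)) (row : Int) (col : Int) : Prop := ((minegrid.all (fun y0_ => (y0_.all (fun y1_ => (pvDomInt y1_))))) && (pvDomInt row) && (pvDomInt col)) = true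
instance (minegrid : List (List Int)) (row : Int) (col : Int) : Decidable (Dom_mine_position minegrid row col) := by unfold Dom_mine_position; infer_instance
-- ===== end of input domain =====

-- B replaces A's enumerate scan with one short-circuit boolean bounds expression (simpler).

-- ===== PORT A =====
-- A's for-loop over enumerate(minegrid), carrying the running index.
def mineLoop (g : List (List Int)) (idx : Int) (row : Int) (col : Int) : Bool :=
  match g with
  | [] => false
  | line :: rest =>
    if idx = row then
      decide (0 ≤ col ∧ col < (line.length : Int))
    else
      mineLoop rest (idx + 1) row col

def mine_position (minegrid : List (List Int)) (row : Int) (col : Int) : Bool :=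
  mineLoop minegrid 0 row col

-- ===== PORT B =====
-- '0 <= row < len(minegrid) and 0 <= col < len(minegrid[row])': the row is only
-- indexed after the short-circuit row check, so the direct index is in range.
def mine_position_alt (minegrid : List (List Int)) (row : Int) (col : Int) : Bool :=
  if 0 ≤ row ∧ row < (minegrid.length : Int) then
    decide (0 ≤ col ∧ col < ((minegrid.getD row.toNat []).length : Int))
  else
    false

-- ===== PRECONDITION & SPEC =====
def Spec_mine_position (minegrid : List (List Int)) (row : Int) (col : Int) (out : Bool) : Prop := out = mine_position_alt minegrid row col
instance (minegrid : List (List Int)) (row : Int) (col : Int) (out : Bool) : Decidable (Spec_mine_position minegrid row col out) := by unfold Spec_mine_position; infer_instance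

-- ===== CLAIM (what is proved, stated in full; the proofs are below) =====
def Claim_equal_mine_position : Prop := ∀ (minegrid : List (List Int)) (row : Int) (col : Int), Dom_mine_position minegrid row col → Spec_mine_position minegrid row col (mine_position minegrid row col)

-- ===== LEMMAS AND PROOFS =====

-- The loop started at index `idx` behaves like the direct check at `row - idx`.
theorem mineLoop_eq_alt (g : List (List Int)) (idx row col : Int) :
    mineLoop g idx row col = mine_position_alt g (row - idx) col := by
  induction g generalizing idx with
  | nil =>
    simp [mineLoop, mine_position_alt]
  | cons line rest ih =>
    by_cases h : idx = row
    · subst h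
      simp only [mineLoop, mine_position_alt, sub_self]
      simp
    · rw [mineLoop, if_neg h, ih]
      unfold mine_position_alt
      by_cases hlt : 0 ≤ row - idx ∧ row - idx < ((line :: rest).length : Int)
      · have h1 : 0 ≤ row - (idx + 1) ∧ row - (idx + 1) < (rest.length : Int) := by
          simp at hlt ⊢; omega
        rw [if_pos hlt, if_pos h1]
        have : (row - idx).toNat = (row - (idx + 1)).toNat + 1 := by omega
        simp [this]
      · have h1 : ¬ (0 ≤ row - (idx + 1) ∧ row - (idx + 1) < (rest.length : Int)) := by
          simp at hlt ⊢; omega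
        rw [if_neg hlt, if_neg h1]

-- ===== VERDICT (by name: the statement is the Claim_ definition above) =====
theorem mine_position_spec : Claim_equal_mine_position := by
  intro g row col _
  unfold Spec_mine_position mine_position
  simpa using mineLoop_eq_alt g 0 row col
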